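-- pv_equiv track=rewrite | github.com/devYaoYH/adventofcode2021 | src/11/main2.py | propagate
-- ===== SOURCE A (Python) =====
-- def propagate(new_blinky, blinky, grid):
--   adj = ((0,1),(0,-1),(1,0),(1,1),(1,-1),(-1,0),(-1,1),(-1,-1))
--   valid = lambda x,y: x >= 0 and y >= 0 and x < len(grid[0]) and y < len(grid)
--   next_blinky = set()
--   new_grid = [[grid[y][x] for x in range(len(grid[0]))] for y in range(len(grid))]
--   for y,x in new_blinky:
--     for ax,ay in adj:
--       nx = x+ax
--       ny = y+ay
--       if valid(nx,ny) and (ny,nx) not in blinky: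
--         new_grid[ny][nx] += 1
--         if new_grid[ny][nx] > 9:
--           next_blinky.add((ny,nx))
--   return new_grid, next_blinky
-- ===== SOURCE B (Python) =====
-- def propagate(new_blinky, blinky, grid):
--   offs = ((-1,-1),(-1,0),(-1,1),(0,-1),(0,1),(1,-1),(1,0),(1,1))
--   h = len(grid)
--   w = len(grid[0]) if grid else 0
--   cnt = {}
--   for p in new_blinky:
--     cnt[p] = cnt.get(p, 0) + 1
--   new_grid = [list(row) for row in grid]
--   next_blinky = set()
--   for y in range(h):
--     for x in range(w):
--       if (y, x) in blinky:
--         continue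
--       c = sum(cnt.get((y + dy, x + dx), 0) for dy, dx in offs)
--       if c:
--         v = grid[y][x] + c
--         new_grid[y][x] = v
--         if v > 9:
--           next_blinky.add((y, x))
--   return new_grid, next_blinky
-- ===== Notes on version B (the rewrite author's own statement) =====
-- stated objective: alternative
-- what changed: Instead of scattering +1 updates neighbor-by-neighbor from each flasher, B builds a multiplicity dict of the flashers once and then does a single row-major gather pass over the grid, computing each cell's total adjacent-flasher count and writing grid[y][x]+count (testing >9 only when count>=1); B also copies rows as they are instead of truncating to the first row's width.
-- intended difference: On ragged grids whose rows are all at least as long as the first row but some row is longer (the only ragged grids A returns on), A silently truncates every row to the first row's width, while B keeps each row's full contents; preserving the cells is the intended behaviour of a fresh copy. — e.g. on propagate([], [], [[1], [2, 3]]): A returns ([[1], [2]], []), B returns ([[1], [2, 3]], [])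
import Mathlib
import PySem

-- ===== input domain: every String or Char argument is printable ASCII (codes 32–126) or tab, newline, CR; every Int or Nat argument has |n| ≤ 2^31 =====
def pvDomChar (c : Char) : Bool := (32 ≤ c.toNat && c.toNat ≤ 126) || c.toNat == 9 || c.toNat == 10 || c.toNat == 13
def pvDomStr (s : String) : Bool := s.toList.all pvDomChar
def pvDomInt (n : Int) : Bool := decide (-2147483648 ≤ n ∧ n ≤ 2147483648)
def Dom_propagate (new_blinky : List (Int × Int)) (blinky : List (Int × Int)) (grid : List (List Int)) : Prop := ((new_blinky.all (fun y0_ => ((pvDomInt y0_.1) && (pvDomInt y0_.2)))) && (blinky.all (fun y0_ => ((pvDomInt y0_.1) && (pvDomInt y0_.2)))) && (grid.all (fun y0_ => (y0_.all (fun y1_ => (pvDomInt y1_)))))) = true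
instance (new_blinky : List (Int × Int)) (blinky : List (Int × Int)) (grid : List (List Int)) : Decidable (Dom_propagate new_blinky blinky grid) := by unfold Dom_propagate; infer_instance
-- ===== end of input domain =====

-- B replaces A's scatter (each flasher increments its 8 neighbours one by one) by a one-pass
-- multiplicity dict over the flashers followed by a row-major gather over the cells; B also copies
-- rows as they are where A truncates them to the first row's width (the stated intended difference).
-- Python returns next_blinky as a set (no iteration order); both ports return its elements
-- canonically sorted (outputs are compared as finite sets).

-- ===== PORT A =====
def pvAdj : List (Int × Int) := [(0,1),(0,-1),(1,0),(1,1),(1,-1),(-1,0),(-1,1),(-1,-1)]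

-- one inner-loop body of A at target q = (ny, nx): the valid/blinky guard, the increment, the >9 test
def pvBodyA (blinky : List (Int × Int)) (w h : Nat)
    (st : List (List Int) × PySem.Set (Int × Int)) (q : Int × Int) :
    List (List Int) × PySem.Set (Int × Int) :=
  if (decide (0 ≤ q.2) && decide (0 ≤ q.1) && decide (q.2 < (w : Int)) && decide (q.1 < (h : Int)))
      && !(blinky.contains q) then
    let g' := st.1.modify q.1.toNat (fun row => row.modify q.2.toNat (· + 1))
    if 9 < (g'.getD q.1.toNat []).getD q.2.toNat 0 then (g', st.2.add q) else (g', st.2)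
  else st

def propagate (new_blinky : List (Int × Int)) (blinky : List (Int × Int)) (grid : List (List Int)) : List (List Int) × (List (Int × Int)) :=
  let w := (grid.headD []).length
  let new_grid := (List.range grid.length).map (fun y => (List.range w).map (fun x => (grid.getD y []).getD x 0))
  let res := new_blinky.foldl
    (fun st p => pvAdj.foldl (fun st a => pvBodyA blinky w grid.length st (p.1 + a.2, p.2 + a.1)) st)
    (new_grid, (PySem.Set.empty : PySem.Set (Int × Int)))
  (res.1, PySem.List.sorted res.2 (fun c => toLex c) false)

-- ===== PORT B =====
def pvOffs : List (Int × Int) := [(-1,-1),(-1,0),(-1,1),(0,-1),(0,1),(1,-1),(1,0),(1,1)]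

-- one cell body of B at (y, x): blinky skip, gather the adjacent-flasher count, write, >9 test
def pvBodyB (blinky : List (Int × Int)) (grid : List (List Int)) (cnt : PySem.Dict (Int × Int) Int)
    (st : List (List Int) × PySem.Set (Int × Int)) (y x : Nat) :
    List (List Int) × PySem.Set (Int × Int) :=
  if blinky.contains ((y : Int), (x : Int)) then st
  else
    let c := (pvOffs.map (fun o => cnt.getD ((y : Int) + o.1, (x : Int) + o.2) 0)).sum
    if c ≠ 0 then
      let v := (grid.getD y []).getD x 0 + c
      let g' := st.1.modify y (fun row => row.set x v)
      if 9 < v then (g', st.2.add ((y : Int), (x : Int))) else (g', st.2)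
    else st

def propagate_alt (new_blinky : List (Int × Int)) (blinky : List (Int × Int)) (grid : List (List Int)) : List (List Int) × (List (Int × Int)) :=
  let h := grid.length
  let w := (grid.headD []).length
  let cnt := new_blinky.foldl (fun d p => d.insert p (d.getD p 0 + 1)) (PySem.Dict.empty : PySem.Dict (Int × Int) Int)
  let res := (List.range h).foldl
    (fun st y => (List.range w).foldl (fun st x => pvBodyB blinky grid cnt st y x) st)
    (grid.map (fun row => row), (PySem.Set.empty : PySem.Set (Int × Int)))
  (res.1, PySem.List.sorted res.2 (fun c => toLex c) false)

-- ===== PRECONDITION & SPEC =====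
-- Pre_ excludes exactly the inputs where A raises IndexError: a grid with a row shorter than the
-- first row (the fresh-copy comprehension indexes it at the first row's width), and an empty grid
-- together with a flasher both of whose coordinates are ≥ -1 (its neighbour check reaches grid[0]).
def Pre_propagate (new_blinky : List (Int × Int)) (blinky : List (Int × Int)) (grid : List (List Int)) : Prop :=
  (∀ row ∈ grid, (grid.headD []).length ≤ row.length) ∧
  (grid = [] → ∀ p ∈ new_blinky, p.2 ≤ -2 ∨ p.1 ≤ -2)
instance (new_blinky : List (Int × Int)) (blinky : List (Int × Int)) (grid : List (List Int)) : Decidable (Pre_propagate new_blinky blinky grid) := by unfold Pre_propagate; infer_instance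

def pvWitness_propagate : (List (Int × Int)) × (List (Int × Int)) × List (List Int) :=
  ([(0, 0)], [(1, 1)], [[1, 2], [3, 9]])

-- On ragged grids whose rows are all at least as long as the first row but some row is longer (the
-- only ragged grids A returns on), A silently truncates every row to the first row's width, while B
-- keeps each row's full contents; preserving the cells is the intended behaviour of a fresh copy.
def D_propagate (new_blinky : List (Int × Int)) (blinky : List (Int × Int)) (grid : List (List Int)) : Prop :=
  ∃ row ∈ grid, (grid.headD []).length < row.length
instance (new_blinky : List (Int × Int)) (blinky : List (Int × Int)) (grid : List (List Int)) : Decidable (D_propagate new_blinky blinky grid) := by unfold D_propagate; infer_instance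

def Spec_propagate (new_blinky : List (Int × Int)) (blinky : List (Int × Int)) (grid : List (List Int)) (out : List (List Int) × (List (Int × Int))) : Prop := ¬ D_propagate new_blinky blinky grid → out = propagate_alt new_blinky blinky grid
instance (new_blinky : List (Int × Int)) (blinky : List (Int × Int)) (grid : List (List Int)) (out : List (List Int) × (List (Int × Int))) : Decidable (Spec_propagate new_blinky blinky grid out) := by unfold Spec_propagate; infer_instance

def pvDiffWitness_propagate : (List (Int × Int)) × (List (Int × Int)) × List (List Int) :=
  ([], [], [[1], [2, 3]])
def pvDiffWitnessOut_propagate : (List (List Int) × (List (Int × Int))) × (List (List Int) × (List (Int × Int))) :=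
  (([[1], [2]], []), ([[1], [2, 3]], []))

-- ===== CLAIM (what is proved, stated in full; the proofs are below) =====
def Claim_unchanged_propagate : Prop := ∀ (new_blinky : List (Int × Int)) (blinky : List (Int × Int)) (grid : List (List Int)), Dom_propagate new_blinky blinky grid → Pre_propagate new_blinky blinky grid → Spec_propagate new_blinky blinky grid (propagate new_blinky blinky grid)
def Claim_changed_propagate : Prop := Dom_propagate (pvDiffWitness_propagate.1) (pvDiffWitness_propagate.2.1) (pvDiffWitness_propagate.2.2) ∧ Pre_propagate (pvDiffWitness_propagate.1) (pvDiffWitness_propagate.2.1) (pvDiffWitness_propagate.2.2) ∧ D_propagate (pvDiffWitness_propagate.1) (pvDiffWitness_propagate.2.1) (pvDiffWitness_propagate.2.2) ∧ propagate (pvDiffWitness_propagate.1) (pvDiffWitness_propagate.2.1) (pvDiffWitness_propagate.2.2) = pvDiffWitnessOut_propagate.1 ∧ propagate_alt (pvDiffWitness_propagate.1) (pvDiffWitness_propagate.2.1) (pvDiffWitness_propagate.2.2) = pvDiffWitnessOut_propagate.2 ∧ pvDiffWitnessOut_propagate.1 ≠ pvDiffWitnessOut_propagate.2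
def Claim_exact_propagate : Prop := ∀ (new_blinky : List (Int × Int)) (blinky : List (Int × Int)) (grid : List (List Int)), Dom_propagate new_blinky blinky grid → Pre_propagate new_blinky blinky grid → D_propagate new_blinky blinky grid → propagate new_blinky blinky grid ≠ propagate_alt new_blinky blinky grid

-- ===== LEMMAS AND PROOFS =====

-- abbreviations for the proofs
def pvW (grid : List (List Int)) : Nat := (grid.headD []).length
def pvCell (g : List (List Int)) (q : Int × Int) : Int := (g.getD q.1.toNat []).getD q.2.toNat 0
def pvGet (g : List (List Int)) (y x : Nat) : Int := (g.getD y []).getD x 0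
def pvElig (blinky : List (Int × Int)) (w h : Nat) (q : Int × Int) : Prop :=
  0 ≤ q.2 ∧ 0 ≤ q.1 ∧ q.2 < (w : Int) ∧ q.1 < (h : Int) ∧ q ∉ blinky
def pvEvents (nb : List (Int × Int)) : List (Int × Int) :=
  nb.flatMap (fun p => pvAdj.map (fun a => (p.1 + a.2, p.2 + a.1)))
def pvInitA (grid : List (List Int)) : List (List Int) :=
  (List.range grid.length).map (fun y => (List.range (pvW grid)).map (fun x => (grid.getD y []).getD x 0))
def pvResA (nb bl : List (Int × Int)) (grid : List (List Int)) :
    List (List Int) × PySem.Set (Int × Int) :=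
  (pvEvents nb).foldl (pvBodyA bl (pvW grid) grid.length) (pvInitA grid, PySem.Set.empty)
def pvCntD (nb : List (Int × Int)) : PySem.Dict (Int × Int) Int :=
  nb.foldl (fun d p => d.insert p (d.getD p 0 + 1)) PySem.Dict.empty
def pvCB (cnt : PySem.Dict (Int × Int) Int) (y x : Nat) : Int :=
  (pvOffs.map (fun o => cnt.getD ((y : Int) + o.1, (x : Int) + o.2) 0)).sum
def pvCells (grid : List (List Int)) : List (Nat × Nat) :=
  (List.range grid.length).flatMap (fun y => (List.range (pvW grid)).map (fun x => (y, x)))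
def pvResB (nb bl : List (Int × Int)) (grid : List (List Int)) :
    List (List Int) × PySem.Set (Int × Int) :=
  (pvCells grid).foldl (fun st c => pvBodyB bl grid (pvCntD nb) st c.1 c.2)
    (grid.map (fun row => row), PySem.Set.empty)

lemma foldl_flatMap' {α β σ : Type} (f : σ → β → σ) (gfn : α → List β) (l : List α) :
    ∀ st : σ, l.foldl (fun st a => (gfn a).foldl f st) st = (l.flatMap gfn).foldl f st := by
  induction l with
  | nil => intro st; simp
  | cons a l ih => intro st; simp [List.flatMap_cons, List.foldl_append, ih]

lemma propagateA_eq (nb bl : List (Int × Int)) (grid : List (List Int)) :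
    propagate nb bl grid = ((pvResA nb bl grid).1, PySem.List.sorted (pvResA nb bl grid).2 (fun c => toLex c) false) := by
  have h := foldl_flatMap' (pvBodyA bl (pvW grid) grid.length)
    (fun p => pvAdj.map (fun a => (p.1 + a.2, p.2 + a.1))) nb
    ((pvInitA grid, PySem.Set.empty) : List (List Int) × PySem.Set (Int × Int))
  simp only [List.foldl_map] at h
  simp only [propagate, pvResA, pvEvents, pvInitA, pvW] at h ⊢
  rw [h]

lemma propagateB_eq (nb bl : List (Int × Int)) (grid : List (List Int)) :
    propagate_alt nb bl grid = ((pvResB nb bl grid).1, PySem.List.sorted (pvResB nb bl grid).2 (fun c => toLex c) false) := by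
  have h := foldl_flatMap' (fun st c => pvBodyB bl grid (pvCntD nb) st c.1 c.2)
    (fun y => (List.range (pvW grid)).map (fun x => (y, x))) (List.range grid.length)
    ((grid.map (fun row => row), PySem.Set.empty) : List (List Int) × PySem.Set (Int × Int))
  simp only [List.foldl_map] at h
  simp only [propagate_alt, pvResB, pvCells, pvCntD, pvW] at h ⊢
  rw [h]

lemma getD_modify_eq {α : Type} (l : List α) (i : Nat) (f : α → α) (d : α) (h : i < l.length) :
    (l.modify i f).getD i d = f (l.getD i d) := by
  simp [List.getD_eq_getElem?_getD, List.getElem?_eq_getElem h]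

lemma getD_modify_ne {α : Type} (l : List α) (i j : Nat) (f : α → α) (d : α) (h : i ≠ j) :
    (l.modify i f).getD j d = l.getD j d := by
  simp [List.getD_eq_getElem?_getD, h]

lemma pvCell_bump_self (g : List (List Int)) (q : Int × Int)
    (h1 : q.1.toNat < g.length) (h2 : q.2.toNat < (g.getD q.1.toNat []).length) :
    pvCell (g.modify q.1.toNat (fun row => row.modify q.2.toNat (· + 1))) q = pvCell g q + 1 := by
  unfold pvCell
  rw [getD_modify_eq _ _ _ _ h1, getD_modify_eq _ _ _ _ h2]

lemma pvCell_bump_ne (g : List (List Int)) (q r : Int × Int)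
    (hq1 : 0 ≤ q.1) (hq2 : 0 ≤ q.2) (hr1 : 0 ≤ r.1) (hr2 : 0 ≤ r.2) (hne : q ≠ r) :
    pvCell (g.modify q.1.toNat (fun row => row.modify q.2.toNat (· + 1))) r = pvCell g r := by
  unfold pvCell
  by_cases hi : q.1.toNat = r.1.toNat
  · have hq1r : q.1 = r.1 := by omega
    have hx : q.2 ≠ r.2 := by
      intro hx; exact hne (Prod.ext_iff.mpr ⟨hq1r, hx⟩)
    have hxn : q.2.toNat ≠ r.2.toNat := by omega
    by_cases hlen : r.1.toNat < g.length
    · rw [hi, getD_modify_eq _ _ _ _ hlen, getD_modify_ne _ _ _ _ _ hxn]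
    · have hnone : (g.modify q.1.toNat (fun row => row.modify q.2.toNat (· + 1)))[r.1.toNat]? = none := by
        rw [List.getElem?_eq_none_iff]
        simpa using Nat.le_of_not_lt hlen
      have hnone' : g[r.1.toNat]? = none := by
        rw [List.getElem?_eq_none_iff]
        exact Nat.le_of_not_lt hlen
      simp [List.getD_eq_getElem?_getD, hnone, hnone']
  · rw [getD_modify_ne _ _ _ _ _ hi]

-- a length-preserving row edit never changes any row length
lemma rowsLen_modify (g : List (List Int)) (k : Nat) (f : List Int → List Int)
    (hf : ∀ r, (f r).length = r.length) :
    ∀ i, ((g.modify k f).getD i []).length = (g.getD i []).length := by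
  intro i
  rw [List.getD_eq_getElem?_getD, List.getD_eq_getElem?_getD, List.getElem?_modify]
  by_cases hk : k = i
  · subst hk; cases g[k]? <;> simp [hf]
  · simp [hk]

lemma count_cons_pair (E : List (Int × Int)) (e q : Int × Int) :
    (e :: E).count q = E.count q + (if q = e then 1 else 0) := by
  by_cases h : q = e
  · rw [h, List.count_cons]
    simp
  · have h2 : ¬((e == q) = true) := by
      simp only [beq_iff_eq]
      exact fun hh => h hh.symm
    rw [List.count_cons, if_neg h2, if_neg h]

-- the A loop invariant: grid cells accumulate one increment per eligible event, the set collects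
-- exactly the eligible cells whose running total has passed 9
lemma loopA (bl : List (Int × Int)) (w h : Nat) (grid : List (List Int)) (E : List (Int × Int)) :
    ∀ (g : List (List Int)) (s : PySem.Set (Int × Int)) (m : (Int × Int) → Nat),
    g.length = h →
    (∀ i, i < h → (g.getD i []).length = w) →
    (∀ q, pvElig bl w h q → pvCell g q = pvCell grid q + (m q : Int)) →
    (∀ q, 0 ≤ q.1 → 0 ≤ q.2 → ¬ pvElig bl w h q → pvCell g q = pvCell grid q) →
    s.Nodup →
    (∀ q, q ∈ s ↔ pvElig bl w h q ∧ 1 ≤ m q ∧ 9 < pvCell grid q + (m q : Int)) →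
    (E.foldl (pvBodyA bl w h) (g, s)).1.length = h ∧
    (∀ i, i < h → ((E.foldl (pvBodyA bl w h) (g, s)).1.getD i []).length = w) ∧
    (∀ q, pvElig bl w h q →
      pvCell (E.foldl (pvBodyA bl w h) (g, s)).1 q = pvCell grid q + ((m q + E.count q : Nat) : Int)) ∧
    (∀ q, 0 ≤ q.1 → 0 ≤ q.2 → ¬ pvElig bl w h q →
      pvCell (E.foldl (pvBodyA bl w h) (g, s)).1 q = pvCell grid q) ∧
    (E.foldl (pvBodyA bl w h) (g, s)).2.Nodup ∧
    (∀ q, q ∈ (E.foldl (pvBodyA bl w h) (g, s)).2 ↔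
      pvElig bl w h q ∧ 1 ≤ m q + E.count q ∧ 9 < pvCell grid q + ((m q + E.count q : Nat) : Int)) := by
  induction E with
  | nil =>
    intro g s m hgl hrow hcell hcell' hnd hmem
    refine ⟨hgl, hrow, ?_, hcell', hnd, ?_⟩
    · intro q hq; simpa using hcell q hq
    · intro q; simpa using hmem q
  | cons e E ih =>
    intro g s m hgl hrow hcell hcell' hnd hmem
    rw [List.foldl_cons]
    by_cases he : pvElig bl w h e
    · obtain ⟨he2, he1, he2w, he1h, hebl⟩ := he
      have helig : pvElig bl w h e := ⟨he2, he1, he2w, he1h, hebl⟩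
      have hy : e.1.toNat < g.length := by rw [hgl]; omega
      have hyh : e.1.toNat < h := by omega
      have hxw : e.2.toNat < w := by omega
      have hx : e.2.toNat < (g.getD e.1.toNat []).length := by rw [hrow e.1.toNat hyh]; exact hxw
      have hguard : ((decide (0 ≤ e.2) && decide (0 ≤ e.1) && decide (e.2 < (w : Int)) && decide (e.1 < (h : Int))) && !(bl.contains e)) = true := by
        simp [he2, he1, he2w, he1h, hebl]
      have hbump : pvCell (g.modify e.1.toNat (fun row => row.modify e.2.toNat (· + 1))) e
          = pvCell grid e + ((m e : Int) + 1) := by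
        rw [pvCell_bump_self g e hy hx, hcell e helig]; ring
      have hstep : pvBodyA bl w h (g, s) e =
          if 9 < pvCell grid e + ((m e : Int) + 1)
          then (g.modify e.1.toNat (fun row => row.modify e.2.toNat (· + 1)), s.add e)
          else (g.modify e.1.toNat (fun row => row.modify e.2.toNat (· + 1)), s) := by
        simp only [pvBodyA]
        rw [if_pos hguard]
        rw [show ((g.modify e.1.toNat (fun row => row.modify e.2.toNat (· + 1))).getD e.1.toNat []).getD e.2.toNat 0
              = pvCell grid e + ((m e : Int) + 1) from hbump]
      rw [hstep]
      have hsh1 : (g.modify e.1.toNat (fun row => row.modify e.2.toNat (· + 1))).length = h := by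
        rw [List.length_modify]; exact hgl
      have hsh2 : ∀ i, i < h → ((g.modify e.1.toNat (fun row => row.modify e.2.toNat (· + 1))).getD i []).length = w := by
        intro i hi
        rw [rowsLen_modify g _ _ (fun r => List.length_modify _ _ _) i]
        exact hrow i hi
      have hsc : ∀ q, pvElig bl w h q →
          pvCell (g.modify e.1.toNat (fun row => row.modify e.2.toNat (· + 1))) q
            = pvCell grid q + (((if q = e then m q + 1 else m q) : Nat) : Int) := by
        intro q hq
        by_cases hqe : q = e
        · simp only [hqe, if_true]
          rw [hbump]; push_cast; ring
        · simp only [if_neg hqe]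
          rw [pvCell_bump_ne g e q he1 he2 hq.2.1 hq.1 (fun hh => hqe hh.symm)]
          exact hcell q hq
      have hsc' : ∀ q, 0 ≤ q.1 → 0 ≤ q.2 → ¬ pvElig bl w h q →
          pvCell (g.modify e.1.toNat (fun row => row.modify e.2.toNat (· + 1))) q = pvCell grid q := by
        intro q hq1 hq2 hnq
        have hne : e ≠ q := by intro hh; exact hnq (hh ▸ helig)
        rw [pvCell_bump_ne g e q he1 he2 hq1 hq2 hne]
        exact hcell' q hq1 hq2 hnq
      by_cases h9 : 9 < pvCell grid e + ((m e : Int) + 1)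
      · rw [if_pos h9]
        have hsnd : (s.add e).Nodup := PySem.Set.nodup_add s e hnd
        have hsmem : ∀ q, q ∈ s.add e ↔ pvElig bl w h q ∧
            1 ≤ (if q = e then m q + 1 else m q) ∧
            9 < pvCell grid q + (((if q = e then m q + 1 else m q) : Nat) : Int) := by
          intro q
          rw [PySem.Set.mem_add]
          by_cases hqe : q = e
          · simp only [hqe, if_true, or_true, true_iff]
            refine ⟨helig, by omega, ?_⟩
            push_cast
            push_cast at h9
            omega
          · simp only [if_neg hqe]
            constructor
            · rintro (hin | hq)
              · exact (hmem q).mp hin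
              · exact absurd hq hqe
            · intro hP; left; exact (hmem q).mpr hP
        obtain ⟨c1, c2, c3, c4, c5, c6⟩ := ih (g.modify e.1.toNat (fun row => row.modify e.2.toNat (· + 1)))
          (s.add e) (fun q => if q = e then m q + 1 else m q) hsh1 hsh2 hsc hsc' hsnd hsmem
        refine ⟨c1, c2, ?_, c4, c5, ?_⟩
        · intro q hq
          rw [c3 q hq, count_cons_pair]
          by_cases hqe : q = e
          · simp only [if_pos hqe]
            have harith : m q + 1 + E.count q = m q + (E.count q + 1) := by omega
            rw [harith]
          · simp only [if_neg hqe, Nat.add_zero]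
        · intro q
          rw [c6 q, count_cons_pair]
          by_cases hqe : q = e
          · simp only [if_pos hqe]
            have harith : m q + 1 + E.count q = m q + (E.count q + 1) := by omega
            rw [harith]
          · simp only [if_neg hqe, Nat.add_zero]
      · rw [if_neg h9]
        have hsmem : ∀ q, q ∈ s ↔ pvElig bl w h q ∧
            1 ≤ (if q = e then m q + 1 else m q) ∧
            9 < pvCell grid q + (((if q = e then m q + 1 else m q) : Nat) : Int) := by
          intro q
          by_cases hqe : q = e
          · simp only [hqe, if_true]
            constructor
            · intro hin
              obtain ⟨_, _, hc⟩ := (hmem e).mp ((hqe ▸ hin : e ∈ s))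
              exfalso
              push_cast at hc h9
              omega
            · rintro ⟨_, _, hc⟩
              exfalso
              push_cast at hc h9
              omega
          · simp only [if_neg hqe]
            exact hmem q
        obtain ⟨c1, c2, c3, c4, c5, c6⟩ := ih (g.modify e.1.toNat (fun row => row.modify e.2.toNat (· + 1)))
          s (fun q => if q = e then m q + 1 else m q) hsh1 hsh2 hsc hsc' hnd hsmem
        refine ⟨c1, c2, ?_, c4, c5, ?_⟩
        · intro q hq
          rw [c3 q hq, count_cons_pair]
          by_cases hqe : q = e
          · simp only [if_pos hqe]
            have harith : m q + 1 + E.count q = m q + (E.count q + 1) := by omega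
            rw [harith]
          · simp only [if_neg hqe, Nat.add_zero]
        · intro q
          rw [c6 q, count_cons_pair]
          by_cases hqe : q = e
          · simp only [if_pos hqe]
            have harith : m q + 1 + E.count q = m q + (E.count q + 1) := by omega
            rw [harith]
          · simp only [if_neg hqe, Nat.add_zero]
    · have hstep : pvBodyA bl w h (g, s) e = (g, s) := by
        simp only [pvBodyA]
        rw [if_neg]
        intro hgtrue
        apply he
        simp only [Bool.and_eq_true, decide_eq_true_eq, Bool.not_eq_true'] at hgtrue
        have hnb : e ∉ bl := by
          simpa using hgtrue.2
        exact ⟨hgtrue.1.1.1.1, hgtrue.1.1.1.2, hgtrue.1.1.2, hgtrue.1.2, hnb⟩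
      rw [hstep]
      obtain ⟨c1, c2, c3, c4, c5, c6⟩ := ih g s m hgl hrow hcell hcell' hnd hmem
      refine ⟨c1, c2, ?_, c4, c5, ?_⟩
      · intro q hq
        have hqe : q ≠ e := fun hh => he (hh ▸ hq)
        rw [c3 q hq, count_cons_pair]
        simp only [if_neg hqe, Nat.add_zero]
      · intro q
        rw [c6 q, count_cons_pair]
        by_cases helq : pvElig bl w h q
        · have hqe : q ≠ e := fun hh => he (hh ▸ helq)
          simp only [if_neg hqe, Nat.add_zero]
        · simp [helq]

lemma cntD_getD (nb : List (Int × Int)) (p : Int × Int) :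
    (pvCntD nb).getD p 0 = (nb.count p : Int) := by
  unfold pvCntD
  rw [PySem.Dict.getD_foldl_insert_add_one nb PySem.Dict.empty p]
  simp

-- one flasher sends exactly one event to each of its 8 neighbours: counting A's events at a cell
-- and gathering B's 8 offsets around that cell agree for a single flasher
set_option maxHeartbeats 1000000 in
lemma crux (p q : Int × Int) :
    ((pvAdj.map (fun a => (p.1 + a.2, p.2 + a.1))).count q : Int)
      = (pvOffs.map (fun o => if (q.1 + o.1, q.2 + o.2) = p then (1 : Int) else 0)).sum := by
  obtain ⟨py, px⟩ := p
  obtain ⟨qy, qx⟩ := q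
  simp only [pvAdj, pvOffs, List.map_cons, List.map_nil, List.sum_cons, List.sum_nil,
    List.count_cons, List.count_nil, beq_iff_eq, Prod.mk.injEq, add_zero]
  push_cast
  have e1 : ∀ c d : Int, ((py + c = qy ∧ px + d = qx) ↔ (qy - py = c ∧ qx - px = d)) := by
    intro c d; omega
  have e2 : ∀ c d : Int, ((qy + c = py ∧ qx + d = px) ↔ (qy - py = -c ∧ qx - px = -d)) := by
    intro c d; omega
  have e1b : ∀ d : Int, ((py = qy ∧ px + d = qx) ↔ (qy - py = 0 ∧ qx - px = d)) := by
    intro d; omega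
  have e1c : ∀ c : Int, ((py + c = qy ∧ px = qx) ↔ (qy - py = c ∧ qx - px = 0)) := by
    intro c; omega
  have e2b : ∀ c : Int, ((qy + c = py ∧ qx = px) ↔ (qy - py = -c ∧ qx - px = 0)) := by
    intro c; omega
  have e2c : ∀ d : Int, ((qy = py ∧ qx + d = px) ↔ (qy - py = 0 ∧ qx - px = -d)) := by
    intro d; omega
  simp only [e1, e2, e1b, e1c, e2b, e2c]
  norm_num
  generalize qy - py = s
  generalize qx - px = t
  by_cases h1 : s = -1 <;> by_cases h2 : s = 0 <;> by_cases h3 : s = 1 <;>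
    by_cases h4 : t = -1 <;> by_cases h5 : t = 0 <;> by_cases h6 : t = 1 <;>
    (try subst_vars) <;> (try simp_all)

-- the neighbour-count bridge: the number of scatter events A sends to a cell equals the gathered
-- sum B computes over the 8 offsets
lemma events_count (nb : List (Int × Int)) (q : Int × Int) :
    ((pvEvents nb).count q : Int) = (pvOffs.map (fun o => (nb.count (q.1 + o.1, q.2 + o.2) : Int))).sum := by
  induction nb with
  | nil => simp [pvEvents, pvOffs]
  | cons p l ih =>
    have hsplit : pvEvents (p :: l) = (pvAdj.map (fun a => (p.1 + a.2, p.2 + a.1))) ++ pvEvents l := by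
      simp [pvEvents, List.flatMap_cons]
    rw [hsplit, List.count_append]
    push_cast
    rw [ih]
    have hmapeq : (pvOffs.map (fun o => ((p :: l).count (q.1 + o.1, q.2 + o.2) : Int)))
        = pvOffs.map (fun o => ((l.count (q.1 + o.1, q.2 + o.2) : Int) + (if (q.1 + o.1, q.2 + o.2) = p then (1 : Int) else 0))) := by
      apply List.map_congr_left
      intro o _
      rw [count_cons_pair]
      push_cast
      ring
    rw [hmapeq, PySem.List.sum_map_add_int]
    rw [crux p q]
    ring

lemma cb_eq_events (nb : List (Int × Int)) (y x : Nat) :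
    pvCB (pvCntD nb) y x = ((pvEvents nb).count ((y : Int), (x : Int)) : Int) := by
  rw [events_count]
  unfold pvCB
  simp only [cntD_getD]

lemma pvGet_write_self (g : List (List Int)) (i j : Nat) (v : Int)
    (h1 : i < g.length) (h2 : j < (g.getD i []).length) :
    pvGet (g.modify i (fun row => row.set j v)) i j = v := by
  unfold pvGet
  rw [getD_modify_eq _ _ _ _ h1]
  have hlen2 : j < ((g.getD i []).set j v).length := by rw [List.length_set]; exact h2
  rw [List.getD_eq_getElem _ _ hlen2]
  simp

lemma pvGet_write_ne (g : List (List Int)) (i j y x : Nat) (v : Int) (hne : ¬(y = i ∧ x = j)) :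
    pvGet (g.modify i (fun row => row.set j v)) y x = pvGet g y x := by
  unfold pvGet
  by_cases hy : i = y
  · subst hy
    have hx : x ≠ j := fun hh => hne ⟨rfl, hh⟩
    by_cases hlen : i < g.length
    · rw [getD_modify_eq _ _ _ _ hlen]
      simp [List.getD_eq_getElem?_getD, List.getElem?_set_ne (fun hh => hx hh.symm)]
    · have hnone : (g.modify i (fun row => row.set j v))[i]? = none := by
        rw [List.getElem?_eq_none_iff]
        simpa using Nat.le_of_not_lt hlen
      have hnone' : g[i]? = none := by
        rw [List.getElem?_eq_none_iff]
        exact Nat.le_of_not_lt hlen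
      simp [List.getD_eq_getElem?_getD, hnone, hnone']
  · rw [getD_modify_ne _ _ _ _ _ hy]

lemma cast_pair_inj (a b : Nat × Nat) (h : ((a.1 : Int), (a.2 : Int)) = ((b.1 : Int), (b.2 : Int))) : a = b := by
  obtain ⟨a1, a2⟩ := a
  obtain ⟨b1, b2⟩ := b
  simpa [Prod.ext_iff] using h

-- the B loop invariant over any duplicate-free list of in-bounds cells
lemma loopB (bl : List (Int × Int)) (grid : List (List Int)) (cnt : PySem.Dict (Int × Int) Int)
    (C : List (Nat × Nat)) :
    ∀ (g : List (List Int)) (s : PySem.Set (Int × Int)),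
    C.Nodup →
    g.length = grid.length →
    (∀ i, (g.getD i []).length = (grid.getD i []).length) →
    (∀ c ∈ C, c.1 < grid.length ∧ c.2 < (grid.getD c.1 []).length) →
    s.Nodup →
    (∀ c ∈ C, ((c.1 : Int), (c.2 : Int)) ∉ s) →
    (C.foldl (fun st c => pvBodyB bl grid cnt st c.1 c.2) (g, s)).1.length = grid.length ∧
    (∀ i, ((C.foldl (fun st c => pvBodyB bl grid cnt st c.1 c.2) (g, s)).1.getD i []).length = (grid.getD i []).length) ∧
    (∀ y x : Nat, pvGet (C.foldl (fun st c => pvBodyB bl grid cnt st c.1 c.2) (g, s)).1 y x =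
      if (y, x) ∈ C ∧ ((y : Int), (x : Int)) ∉ bl ∧ pvCB cnt y x ≠ 0
      then pvGet grid y x + pvCB cnt y x else pvGet g y x) ∧
    (C.foldl (fun st c => pvBodyB bl grid cnt st c.1 c.2) (g, s)).2.Nodup ∧
    (∀ q, q ∈ (C.foldl (fun st c => pvBodyB bl grid cnt st c.1 c.2) (g, s)).2 ↔
      q ∈ s ∨ ∃ c ∈ C, q = ((c.1 : Int), (c.2 : Int)) ∧ ((c.1 : Int), (c.2 : Int)) ∉ bl ∧
        pvCB cnt c.1 c.2 ≠ 0 ∧ 9 < pvGet grid c.1 c.2 + pvCB cnt c.1 c.2) := by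
  induction C with
  | nil =>
    intro g s _ hgl hrow _ hnd _
    refine ⟨hgl, hrow, ?_, hnd, ?_⟩
    · intro y x; simp
    · intro q; simp
  | cons c C ih =>
    intro g s hCnd hgl hrow hin hnd hdisj
    obtain ⟨hcC, hCnd'⟩ := List.nodup_cons.mp hCnd
    obtain ⟨hc1, hc2⟩ := hin c (List.mem_cons_self)
    rw [List.foldl_cons]
    by_cases hblm : ((c.1 : Int), (c.2 : Int)) ∈ bl
    · have hstep : pvBodyB bl grid cnt (g, s) c.1 c.2 = (g, s) := by
        simp only [pvBodyB]
        rw [if_pos (by simpa using hblm)]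
      rw [hstep]
      obtain ⟨c1, c2, c3, c4, c5⟩ := ih g s hCnd' hgl hrow
        (fun c' hc' => hin c' (List.mem_cons_of_mem c hc')) hnd
        (fun c' hc' => hdisj c' (List.mem_cons_of_mem c hc'))
      refine ⟨c1, c2, ?_, c4, ?_⟩
      · intro y x
        rw [c3 y x]
        by_cases hyx : (y, x) ∈ C
        · exact if_congr (by simp [hyx]) rfl rfl
        · by_cases hyxc : (y, x) = c
          · rw [if_neg (by tauto), if_neg ?_]
            rintro ⟨_, hb, _⟩
            have hyy : y = c.1 := congrArg Prod.fst hyxc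
            have hxx : x = c.2 := congrArg Prod.snd hyxc
            rw [hyy, hxx] at hb
            exact hb hblm
          · exact if_congr (by simp [List.mem_cons, hyx, hyxc]) rfl rfl
      · intro q
        rw [c5 q]
        constructor
        · rintro (hq | ⟨c', hc', rest⟩)
          · exact Or.inl hq
          · exact Or.inr ⟨c', List.mem_cons_of_mem c hc', rest⟩
        · rintro (hq | ⟨c', hc', heq, hnb, rest⟩)
          · exact Or.inl hq
          · rcases List.mem_cons.mp hc' with hcc | hc''
            · exfalso; rw [hcc] at hnb; exact hnb hblm
            · exact Or.inr ⟨c', hc'', heq, hnb, rest⟩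
    · by_cases hc0 : pvCB cnt c.1 c.2 = 0
      · have hstep : pvBodyB bl grid cnt (g, s) c.1 c.2 = (g, s) := by
          simp only [pvBodyB]
          rw [if_neg (by simpa using hblm)]
          rw [if_neg (show ¬((pvOffs.map (fun o => cnt.getD ((c.1 : Int) + o.1, (c.2 : Int) + o.2) 0)).sum ≠ 0) from fun hh => hh hc0)]
        rw [hstep]
        obtain ⟨c1, c2, c3, c4, c5⟩ := ih g s hCnd' hgl hrow
          (fun c' hc' => hin c' (List.mem_cons_of_mem c hc')) hnd
          (fun c' hc' => hdisj c' (List.mem_cons_of_mem c hc'))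
        refine ⟨c1, c2, ?_, c4, ?_⟩
        · intro y x
          rw [c3 y x]
          by_cases hyx : (y, x) ∈ C
          · exact if_congr (by simp [hyx]) rfl rfl
          · by_cases hyxc : (y, x) = c
            · rw [if_neg (by tauto), if_neg ?_]
              rintro ⟨_, _, hcb⟩
              have hy : y = c.1 := congrArg Prod.fst hyxc
              have hx : x = c.2 := congrArg Prod.snd hyxc
              rw [hy, hx] at hcb
              exact hcb hc0
            · exact if_congr (by simp [List.mem_cons, hyx, hyxc]) rfl rfl
        · intro q
          rw [c5 q]
          constructor
          · rintro (hq | ⟨c', hc', rest⟩)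
            · exact Or.inl hq
            · exact Or.inr ⟨c', List.mem_cons_of_mem c hc', rest⟩
          · rintro (hq | ⟨c', hc', heq, hnb, hcb, h9'⟩)
            · exact Or.inl hq
            · rcases List.mem_cons.mp hc' with hcc | hc''
              · exfalso; rw [hcc] at hcb; exact hcb hc0
              · exact Or.inr ⟨c', hc'', heq, hnb, hcb, h9'⟩
      · have hstep : pvBodyB bl grid cnt (g, s) c.1 c.2 =
            if 9 < pvGet grid c.1 c.2 + pvCB cnt c.1 c.2
            then (g.modify c.1 (fun row => row.set c.2 (pvGet grid c.1 c.2 + pvCB cnt c.1 c.2)), s.add ((c.1 : Int), (c.2 : Int)))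
            else (g.modify c.1 (fun row => row.set c.2 (pvGet grid c.1 c.2 + pvCB cnt c.1 c.2)), s) := by
          simp only [pvBodyB]
          rw [if_neg (by simpa using hblm)]
          rw [if_pos (show ((pvOffs.map (fun o => cnt.getD ((c.1 : Int) + o.1, (c.2 : Int) + o.2) 0)).sum ≠ 0) from hc0)]
          rfl
        rw [hstep]
        have hg1 : c.1 < g.length := by rw [hgl]; exact hc1
        have hg2 : c.2 < (g.getD c.1 []).length := by rw [hrow c.1]; exact hc2
        have hsh1 : (g.modify c.1 (fun row => row.set c.2 (pvGet grid c.1 c.2 + pvCB cnt c.1 c.2))).length = grid.length := by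
          rw [List.length_modify]; exact hgl
        have hsh2 : ∀ i, ((g.modify c.1 (fun row => row.set c.2 (pvGet grid c.1 c.2 + pvCB cnt c.1 c.2))).getD i []).length = (grid.getD i []).length := by
          intro i
          rw [rowsLen_modify g _ _ (fun _ => List.length_set) i]
          exact hrow i
        by_cases h9 : 9 < pvGet grid c.1 c.2 + pvCB cnt c.1 c.2
        · rw [if_pos h9]
          have hdisj' : ∀ c' ∈ C, ((c'.1 : Int), (c'.2 : Int)) ∉ (s.add ((c.1 : Int), (c.2 : Int))) := by
            intro c' hc' hmm
            rcases (PySem.Set.mem_add _ _ _).mp hmm with hins | hcast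
            · exact hdisj c' (List.mem_cons_of_mem c hc') hins
            · exact hcC (cast_pair_inj c' c hcast ▸ hc')
          obtain ⟨c1, c2, c3, c4, c5⟩ := ih
            (g.modify c.1 (fun row => row.set c.2 (pvGet grid c.1 c.2 + pvCB cnt c.1 c.2)))
            (s.add ((c.1 : Int), (c.2 : Int))) hCnd' hsh1 hsh2
            (fun c' hc' => hin c' (List.mem_cons_of_mem c hc'))
            (PySem.Set.nodup_add _ _ hnd) hdisj'
          refine ⟨c1, c2, ?_, c4, ?_⟩
          · intro y x
            rw [c3 y x]
            by_cases hyx : (y, x) ∈ C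
            · have hnec : ¬(y = c.1 ∧ x = c.2) := by
                intro hh
                exact hcC ((Prod.ext_iff.mpr ⟨hh.1, hh.2⟩ : (y, x) = c) ▸ hyx)
              exact if_congr (by simp [hyx]) rfl (pvGet_write_ne g c.1 c.2 y x _ hnec)
            · by_cases hyxc : (y, x) = c
              · have hyy : y = c.1 := congrArg Prod.fst hyxc
                have hxx : x = c.2 := congrArg Prod.snd hyxc
                subst hyy; subst hxx
                rw [if_neg (by tauto), if_pos ⟨List.mem_cons_self, hblm, hc0⟩]
                exact pvGet_write_self g c.1 c.2 _ hg1 hg2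
              · have hne : ¬(y = c.1 ∧ x = c.2) := by
                  intro hh; exact hyxc (Prod.ext_iff.mpr ⟨hh.1, hh.2⟩)
                rw [if_neg (by tauto), if_neg ?_]
                · exact pvGet_write_ne g c.1 c.2 y x _ hne
                · rintro ⟨hm, _⟩
                  rcases List.mem_cons.mp hm with hh | hh
                  · exact hyxc hh
                  · exact hyx hh
          · intro q
            rw [c5 q, PySem.Set.mem_add]
            constructor
            · rintro ((hq | hqc) | ⟨c', hc', rest⟩)
              · exact Or.inl hq
              · exact Or.inr ⟨c, List.mem_cons_self, hqc, hblm, hc0, h9⟩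
              · exact Or.inr ⟨c', List.mem_cons_of_mem c hc', rest⟩
            · rintro (hq | ⟨c', hc', heq, hnb, hcb, h9'⟩)
              · exact Or.inl (Or.inl hq)
              · rcases List.mem_cons.mp hc' with hcc | hmem'
                · subst hcc
                  exact Or.inl (Or.inr heq)
                · exact Or.inr ⟨c', hmem', heq, hnb, hcb, h9'⟩
        · rw [if_neg h9]
          obtain ⟨c1, c2, c3, c4, c5⟩ := ih
            (g.modify c.1 (fun row => row.set c.2 (pvGet grid c.1 c.2 + pvCB cnt c.1 c.2)))
            s hCnd' hsh1 hsh2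
            (fun c' hc' => hin c' (List.mem_cons_of_mem c hc')) hnd
            (fun c' hc' => hdisj c' (List.mem_cons_of_mem c hc'))
          refine ⟨c1, c2, ?_, c4, ?_⟩
          · intro y x
            rw [c3 y x]
            by_cases hyx : (y, x) ∈ C
            · have hnec : ¬(y = c.1 ∧ x = c.2) := by
                intro hh
                exact hcC ((Prod.ext_iff.mpr ⟨hh.1, hh.2⟩ : (y, x) = c) ▸ hyx)
              exact if_congr (by simp [hyx]) rfl (pvGet_write_ne g c.1 c.2 y x _ hnec)
            · by_cases hyxc : (y, x) = c
              · have hyy : y = c.1 := congrArg Prod.fst hyxc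
                have hxx : x = c.2 := congrArg Prod.snd hyxc
                subst hyy; subst hxx
                rw [if_neg (by tauto), if_pos ⟨List.mem_cons_self, hblm, hc0⟩]
                exact pvGet_write_self g c.1 c.2 _ hg1 hg2
              · have hne : ¬(y = c.1 ∧ x = c.2) := by
                  intro hh; exact hyxc (Prod.ext_iff.mpr ⟨hh.1, hh.2⟩)
                rw [if_neg (by tauto), if_neg ?_]
                · exact pvGet_write_ne g c.1 c.2 y x _ hne
                · rintro ⟨hm, _⟩
                  rcases List.mem_cons.mp hm with hh | hh
                  · exact hyxc hh
                  · exact hyx hh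
          · intro q
            rw [c5 q]
            constructor
            · rintro (hq | ⟨c', hc', rest⟩)
              · exact Or.inl hq
              · exact Or.inr ⟨c', List.mem_cons_of_mem c hc', rest⟩
            · rintro (hq | ⟨c', hc', heq, hnb, hcb, h9'⟩)
              · exact Or.inl hq
              · rcases List.mem_cons.mp hc' with hcc | hmem'
                · exfalso
                  rw [hcc] at h9'
                  exact h9 h9'
                · exact Or.inr ⟨c', hmem', heq, hnb, hcb, h9'⟩

lemma pvCells_nodup (grid : List (List Int)) : (pvCells grid).Nodup := by
  have heq : pvCells grid = List.range grid.length ×ˢ List.range (pvW grid) := rfl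
  rw [heq]
  exact List.Nodup.product (List.nodup_range) (List.nodup_range)

lemma pvCells_mem (grid : List (List Int)) (c : Nat × Nat) :
    c ∈ pvCells grid ↔ c.1 < grid.length ∧ c.2 < pvW grid := by
  have heq : pvCells grid = List.range grid.length ×ˢ List.range (pvW grid) := rfl
  rw [heq, List.mem_product]
  simp

lemma pvInitA_len (grid : List (List Int)) : (pvInitA grid).length = grid.length := by
  unfold pvInitA; simp

lemma pvInitA_row (grid : List (List Int)) :
    ∀ k, k < grid.length → ((pvInitA grid).getD k []).length = pvW grid := by
  intro k hk
  unfold pvInitA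
  rw [PySem.List.getD_map_range _ _ _ _ hk]
  simp

-- A's single step leaves the grid alone or bumps one cell
lemma stepA_grid (bl : List (Int × Int)) (w h : Nat)
    (st : List (List Int) × PySem.Set (Int × Int)) (e : Int × Int) :
    (pvBodyA bl w h st e).1 = st.1 ∨
    (pvBodyA bl w h st e).1 = st.1.modify e.1.toNat (fun row => row.modify e.2.toNat (· + 1)) := by
  simp only [pvBodyA]
  split
  · split
    · right; rfl
    · right; rfl
  · left; rfl

lemma loopA_shape (bl : List (Int × Int)) (w h : Nat) (E : List (Int × Int)) :
    ∀ (g : List (List Int)) (s : PySem.Set (Int × Int)),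
    (E.foldl (pvBodyA bl w h) (g, s)).1.length = g.length ∧
    (∀ i, ((E.foldl (pvBodyA bl w h) (g, s)).1.getD i []).length = (g.getD i []).length) := by
  induction E with
  | nil => intro g s; exact ⟨rfl, fun _ => rfl⟩
  | cons e E ih =>
    intro g s
    rw [List.foldl_cons]
    rcases hst : pvBodyA bl w h (g, s) e with ⟨g1, s1⟩
    have hor := stepA_grid bl w h (g, s) e
    rw [hst] at hor
    have hg1 : g1.length = g.length ∧ ∀ i, ((g1.getD i []).length = (g.getD i []).length) := by
      rcases hor with hh | hh
      · have hh' : g1 = g := hh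
        exact ⟨by rw [hh'], fun i => by rw [hh']⟩
      · have hh' : g1 = g.modify e.1.toNat (fun row => row.modify e.2.toNat (· + 1)) := hh
        refine ⟨by rw [hh', List.length_modify], ?_⟩
        intro i
        rw [hh']
        exact rowsLen_modify g _ _ (fun r => List.length_modify _ _ _) i
    obtain ⟨i1, i2⟩ := ih g1 s1
    exact ⟨i1.trans hg1.1, fun i => (i2 i).trans (hg1.2 i)⟩

-- B's single step leaves the grid alone or writes one cell
lemma stepB_grid (bl : List (Int × Int)) (grid : List (List Int)) (cnt : PySem.Dict (Int × Int) Int)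
    (st : List (List Int) × PySem.Set (Int × Int)) (y x : Nat) :
    (pvBodyB bl grid cnt st y x).1 = st.1 ∨
    ∃ v, (pvBodyB bl grid cnt st y x).1 = st.1.modify y (fun row => row.set x v) := by
  simp only [pvBodyB]
  split
  · left; rfl
  · split
    · split
      · right; exact ⟨_, rfl⟩
      · right; exact ⟨_, rfl⟩
    · left; rfl

lemma loopB_shape (bl : List (Int × Int)) (grid : List (List Int)) (cnt : PySem.Dict (Int × Int) Int)
    (C : List (Nat × Nat)) :
    ∀ (g : List (List Int)) (s : PySem.Set (Int × Int)),
    (C.foldl (fun st c => pvBodyB bl grid cnt st c.1 c.2) (g, s)).1.length = g.length ∧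
    (∀ i, ((C.foldl (fun st c => pvBodyB bl grid cnt st c.1 c.2) (g, s)).1.getD i []).length = (g.getD i []).length) := by
  induction C with
  | nil => intro g s; exact ⟨rfl, fun _ => rfl⟩
  | cons c C ih =>
    intro g s
    rw [List.foldl_cons]
    rcases hst : pvBodyB bl grid cnt (g, s) c.1 c.2 with ⟨g1, s1⟩
    have hor := stepB_grid bl grid cnt (g, s) c.1 c.2
    rw [hst] at hor
    have hg1 : g1.length = g.length ∧ ∀ i, ((g1.getD i []).length = (g.getD i []).length) := by
      rcases hor with hh | ⟨v, hh⟩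
      · have hh' : g1 = g := hh
        exact ⟨by rw [hh'], fun i => by rw [hh']⟩
      · have hh' : g1 = g.modify c.1 (fun row => row.set c.2 v) := hh
        refine ⟨by rw [hh', List.length_modify], ?_⟩
        intro i
        rw [hh']
        exact rowsLen_modify g _ _ (fun _ => List.length_set) i
    obtain ⟨i1, i2⟩ := ih g1 s1
    exact ⟨i1.trans hg1.1, fun i => (i2 i).trans (hg1.2 i)⟩

-- ===== VERDICT (by name: the statement is the Claim_ definition above) =====
theorem propagate_spec : Claim_unchanged_propagate := by
  unfold Claim_unchanged_propagate
  intro nb bl grid _ hpre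
  unfold Spec_propagate
  intro hD
  have hrect : ∀ i, i < grid.length → (grid.getD i []).length = pvW grid := by
    intro i hi
    have hmem : grid.getD i [] ∈ grid := by
      rw [List.getD_eq_getElem _ _ hi]
      exact List.getElem_mem hi
    have hge := hpre.1 _ hmem
    have hle : ¬ (pvW grid < (grid.getD i []).length) := fun hlt => hD ⟨_, hmem, hlt⟩
    unfold pvW at hge hle ⊢
    omega
  rw [propagateA_eq, propagateB_eq]
  -- A-side characterization
  have hInitCell : ∀ q, 0 ≤ q.1 → 0 ≤ q.2 → q.1.toNat < grid.length → q.2.toNat < pvW grid →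
      pvCell (pvInitA grid) q = pvCell grid q := by
    intro q _ _ hyn hxn
    unfold pvCell pvInitA
    rw [PySem.List.getD_map_range _ _ _ _ hyn, PySem.List.getD_map_range _ _ _ _ hxn]
  have hInitCell' : ∀ q, 0 ≤ q.1 → 0 ≤ q.2 → ¬ pvElig bl (pvW grid) grid.length q →
      pvCell (pvInitA grid) q = pvCell grid q := by
    intro q hy0 hx0 _
    by_cases hyn : q.1.toNat < grid.length
    · by_cases hxn : q.2.toNat < pvW grid
      · exact hInitCell q hy0 hx0 hyn hxn
      · have hrowA : (pvInitA grid).getD q.1.toNat [] = (List.range (pvW grid)).map (fun x => (grid.getD q.1.toNat []).getD x 0) := by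
          unfold pvInitA
          rw [PySem.List.getD_map_range _ _ _ _ hyn]
        have hcl2 : ((List.range (pvW grid)).map (fun x => (grid.getD q.1.toNat []).getD x 0)).getD q.2.toNat 0 = 0 :=
          List.getD_eq_default _ _ (by simp; omega)
        have hcl : (grid.getD q.1.toNat []).getD q.2.toNat 0 = 0 :=
          List.getD_eq_default _ _ (by rw [hrect q.1.toNat hyn]; omega)
        unfold pvCell
        rw [hrowA, hcl2, hcl]
    · have hrow0 : (pvInitA grid).getD q.1.toNat [] = [] :=
        List.getD_eq_default _ _ (by rw [pvInitA_len]; omega)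
      have hrow1 : grid.getD q.1.toNat [] = [] :=
        List.getD_eq_default _ _ (by omega)
      unfold pvCell
      rw [hrow0, hrow1]
  obtain ⟨a1, a2, a3, a4, a5, a6⟩ := loopA bl (pvW grid) grid.length grid (pvEvents nb)
    (pvInitA grid) PySem.Set.empty (fun _ => 0) (pvInitA_len grid) (pvInitA_row grid)
    (fun q hq => by
      rw [hInitCell q hq.2.1 hq.1 (by obtain ⟨h2, h1, hw, hh, _⟩ := hq; omega)
        (by obtain ⟨h2, h1, hw, hh, _⟩ := hq; omega)]
      simp)
    hInitCell' List.nodup_nil (fun q => by simp)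
  have hresA : (pvEvents nb).foldl (pvBodyA bl (pvW grid) grid.length) (pvInitA grid, PySem.Set.empty) = pvResA nb bl grid := rfl
  rw [hresA] at a1 a2 a3 a4 a5 a6
  simp only [Nat.zero_add] at a3 a6
  -- B-side characterization
  have hmapid : grid.map (fun row => row) = grid := List.map_id' grid
  obtain ⟨b1, b2, b3, b4, b5⟩ := loopB bl grid (pvCntD nb) (pvCells grid)
    (grid.map (fun row => row)) PySem.Set.empty (pvCells_nodup grid)
    (by rw [hmapid]) (by rw [hmapid]; exact fun _ => rfl)
    (fun c hc => by
      obtain ⟨h1, h2⟩ := (pvCells_mem grid c).mp hc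
      exact ⟨h1, by rw [hrect c.1 h1]; exact h2⟩)
    List.nodup_nil (fun c _ => by simp)
  have hresB : (pvCells grid).foldl (fun st c => pvBodyB bl grid (pvCntD nb) st c.1 c.2) (grid.map (fun row => row), PySem.Set.empty) = pvResB nb bl grid := rfl
  rw [hresB] at b1 b2 b3 b4 b5
  have hmap' : ∀ y x : Nat, pvGet (grid.map (fun row => row)) y x = pvGet grid y x := by
    intro y x; rw [hmapid]
  refine Prod.ext_iff.mpr ⟨?_, ?_⟩
  · -- the grids agree
    apply List.ext_getElem?
    intro i
    by_cases hi : i < grid.length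
    · have hiA : i < (pvResA nb bl grid).1.length := by rw [a1]; exact hi
      have hiB : i < (pvResB nb bl grid).1.length := by rw [b1]; exact hi
      rw [List.getElem?_eq_getElem hiA, List.getElem?_eq_getElem hiB]
      rw [← List.getD_eq_getElem (pvResA nb bl grid).1 [] hiA,
        ← List.getD_eq_getElem (pvResB nb bl grid).1 [] hiB]
      congr 1
      apply List.ext_getElem?
      intro j
      by_cases hj : j < pvW grid
      · have hjA : j < ((pvResA nb bl grid).1.getD i []).length := by rw [a2 i hi]; exact hj
        have hjB : j < ((pvResB nb bl grid).1.getD i []).length := by rw [b2 i, hrect i hi]; exact hj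
        rw [List.getElem?_eq_getElem hjA, List.getElem?_eq_getElem hjB]
        rw [← List.getD_eq_getElem ((pvResA nb bl grid).1.getD i []) 0 hjA,
          ← List.getD_eq_getElem ((pvResB nb bl grid).1.getD i []) 0 hjB]
        congr 1
        show pvGet (pvResA nb bl grid).1 i j = pvGet (pvResB nb bl grid).1 i j
        have hAcell : pvGet (pvResA nb bl grid).1 i j = pvCell (pvResA nb bl grid).1 ((i : Int), (j : Int)) := rfl
        have hPP2 : pvGet grid i j = pvCell grid ((i : Int), (j : Int)) := rfl
        rw [hAcell, b3 i j]
        by_cases hbl2 : ((i : Int), (j : Int)) ∈ bl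
        · rw [a4 ((i : Int), (j : Int)) (by simp) (by simp) (fun hh => hh.2.2.2.2 hbl2)]
          rw [if_neg (fun hh => hh.2.1 hbl2)]
          rw [hmap' i j]
          exact hPP2.symm
        · have helig : pvElig bl (pvW grid) grid.length ((i : Int), (j : Int)) :=
            ⟨by simp, by simp, by simpa using hj, by simpa using hi, hbl2⟩
          rw [a3 ((i : Int), (j : Int)) helig]
          by_cases hcnt : (pvEvents nb).count ((i : Int), (j : Int)) = 0
          · have hcond : ¬(((i, j) : Nat × Nat) ∈ pvCells grid ∧ ((i : Int), (j : Int)) ∉ bl ∧ pvCB (pvCntD nb) i j ≠ 0) := by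
              rintro ⟨_, _, hcb⟩
              exact hcb (by rw [cb_eq_events, hcnt]; rfl)
            rw [if_neg hcond, hmap' i j, hPP2, hcnt]
            norm_num
          · rw [if_pos ⟨(pvCells_mem grid ((i, j) : Nat × Nat)).mpr ⟨hi, hj⟩, hbl2,
              fun hh => hcnt (by rw [cb_eq_events] at hh; exact_mod_cast hh)⟩]
            rw [cb_eq_events, hPP2]
      · have hA0 : ((pvResA nb bl grid).1.getD i []).length ≤ j := by rw [a2 i hi]; omega
        have hB0 : ((pvResB nb bl grid).1.getD i []).length ≤ j := by rw [b2 i, hrect i hi]; omega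
        rw [List.getElem?_eq_none hA0, List.getElem?_eq_none hB0]
    · rw [List.getElem?_eq_none (by rw [a1]; omega), List.getElem?_eq_none (by rw [b1]; omega)]
  · -- the flash sets agree up to the canonical sorting
    apply PySem.List.sorted_eq_sorted_of_perm _ _ _ toLex.injective
    apply (List.perm_ext_iff_of_nodup a5 b4).mpr
    intro q
    rw [a6 q, b5 q]
    constructor
    · rintro ⟨⟨hx0, hy0, hxw, hyh, hbl⟩, hge, hgt⟩
      have hq : ((q.1.toNat : Int), (q.2.toNat : Int)) = q :=
        Prod.ext_iff.mpr ⟨Int.toNat_of_nonneg hy0, Int.toNat_of_nonneg hx0⟩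
      refine Or.inr ⟨(q.1.toNat, q.2.toNat), (pvCells_mem grid _).mpr ⟨by omega, by omega⟩,
        hq.symm, ?_, ?_, ?_⟩
      · rw [hq]; exact hbl
      · intro hc
        rw [cb_eq_events, hq] at hc
        have hc0 : (pvEvents nb).count q = 0 := by exact_mod_cast hc
        omega
      · rw [cb_eq_events, hq]
        have hPP : pvGet grid q.1.toNat q.2.toNat = pvCell grid q := rfl
        rw [hPP]
        omega
    · rintro (hq | ⟨c, hc, heq, hnb, hcb, h9⟩)
      · exact (List.not_mem_nil hq).elim
      · obtain ⟨hcc1, hcc2⟩ := (pvCells_mem grid c).mp hc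
        subst heq
        rw [cb_eq_events] at hcb h9
        have hPP : pvGet grid c.1 c.2 = pvCell grid ((c.1 : Int), (c.2 : Int)) := rfl
        rw [hPP] at h9
        have hcnt0 : (pvEvents nb).count ((c.1 : Int), (c.2 : Int)) ≠ 0 := by
          intro hh; exact hcb (by rw [hh]; rfl)
        refine ⟨⟨by simp, by simp, by simpa using hcc2, by simpa using hcc1, hnb⟩, by omega, ?_⟩
        omega

theorem propagate_changed : Claim_changed_propagate := by
  unfold Claim_changed_propagate; decide

theorem propagate_tight : Claim_exact_propagate := by
  unfold Claim_exact_propagate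
  intro nb bl grid _ hpre hD heq
  obtain ⟨row, hrowmem, hlt⟩ := hD
  obtain ⟨i, hi, hrowi⟩ := List.mem_iff_getElem.mp hrowmem
  rw [propagateA_eq, propagateB_eq] at heq
  have h1 : (pvResA nb bl grid).1 = (pvResB nb bl grid).1 := by
    have := congrArg Prod.fst heq
    simpa using this
  obtain ⟨sa1, sa2⟩ := loopA_shape bl (pvW grid) grid.length (pvEvents nb) (pvInitA grid) PySem.Set.empty
  obtain ⟨sb1, sb2⟩ := loopB_shape bl grid (pvCntD nb) (pvCells grid) (grid.map (fun row => row)) PySem.Set.empty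
  have hresA : (pvEvents nb).foldl (pvBodyA bl (pvW grid) grid.length) (pvInitA grid, PySem.Set.empty) = pvResA nb bl grid := rfl
  have hresB : (pvCells grid).foldl (fun st c => pvBodyB bl grid (pvCntD nb) st c.1 c.2) (grid.map (fun row => row), PySem.Set.empty) = pvResB nb bl grid := rfl
  rw [hresA] at sa2
  rw [hresB] at sb2
  have hAlen : ((pvResA nb bl grid).1.getD i []).length = pvW grid := by
    rw [sa2 i, pvInitA_row grid i hi]
  have hBlen : ((pvResB nb bl grid).1.getD i []).length = row.length := by
    rw [sb2 i, List.map_id', List.getD_eq_getElem _ _ hi, hrowi]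
  have hfin : (grid.headD []).length < ((pvResB nb bl grid).1.getD i []).length := by
    rw [hBlen]; exact hlt
  rw [← h1, hAlen] at hfin
  unfold pvW at hfin
  omega
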